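-- pv_equiv track=rewrite | github.com/rblis/leetcode | problems/Minimum_Consecutive_Cards_to_Pick_Up.py | minimumCardPickup
-- ===== SOURCE A (Python) =====
-- def minimumCardPickup(cards: list[int]) -> int:
--     dups = {}
--     ans = float('inf')
--     for i,card in enumerate(cards):
--         if card not in dups:
--             dups[card] = i
--         else:
--             ans = min(i-dups[card] + 1, ans)
--             dups[card] = i
--     return ans if ans != float('inf') else -1
-- ===== SOURCE B (Python) =====
-- def minimumCardPickup(cards: list[int]) -> int:
--     # Two-phase: group indices per value, then scan consecutive gaps per group.
--     groups = {}
--     for i, card in enumerate(cards):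
--         groups.setdefault(card, []).append(i)
--     best = None
--     for idxs in groups.values():
--         for a, b in zip(idxs, idxs[1:]):
--             d = b - a + 1
--             if best is None or d < best:
--                 best = d
--     return -1 if best is None else best
-- ===== Notes on version B (the rewrite author's own statement) =====
-- stated objective: alternative
-- what changed: Replaces A's single pass that tracks the last-seen index and updates a running minimum inline with a two-phase decomposition: first group all indices of each value into lists, then a separate pass over the groups minimizes consecutive-index gaps.
import Mathlib
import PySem

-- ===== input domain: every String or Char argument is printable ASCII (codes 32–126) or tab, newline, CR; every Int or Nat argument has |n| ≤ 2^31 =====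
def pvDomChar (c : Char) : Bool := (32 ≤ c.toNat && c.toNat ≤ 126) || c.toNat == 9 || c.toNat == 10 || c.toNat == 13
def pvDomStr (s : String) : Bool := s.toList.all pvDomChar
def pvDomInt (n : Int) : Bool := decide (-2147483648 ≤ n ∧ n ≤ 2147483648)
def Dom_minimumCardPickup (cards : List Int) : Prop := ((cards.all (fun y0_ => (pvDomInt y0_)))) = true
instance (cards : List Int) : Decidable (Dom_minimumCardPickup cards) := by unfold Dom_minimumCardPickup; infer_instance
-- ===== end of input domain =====

-- B replaces A's single-pass last-index/running-min loop with a two-phase decomposition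
-- (group all indices per value, then minimize consecutive gaps per group); alternative, same cost.


-- ===== PORT A =====
-- float('inf') / min-with-inf is ported as Option Int (none = inf), exact for the int values A ever stores
def pvMinInf (x : Int) (ans : Option Int) : Option Int :=
  match ans with
  | none => some x
  | some a => some (min x a)

def pvStepA (st : PySem.Dict Int Int × Option Int) (p : Int × Int) :
    PySem.Dict Int Int × Option Int :=
  match st.1.get? p.2 with
  | none => (st.1.insert p.2 p.1, st.2)
  | some j => (st.1.insert p.2 p.1, pvMinInf (p.1 - j + 1) st.2)

def minimumCardPickup (cards : List Int) : Int :=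
  let st := (PySem.List.enumerate cards).foldl pvStepA (PySem.Dict.mk [], none)
  match st.2 with
  | none => -1
  | some a => a

-- ===== PORT B =====
-- inner loop over zip(idxs, idxs[1:]): 'if best is None or d < best'
def pvStepB (best : Option Int) (d : Int) : Option Int :=
  match best with
  | none => some d
  | some b => if d < b then some d else some b

def pvGaps (best : Option Int) (idxs : List Int) : Option Int :=
  (idxs.zip idxs.tail).foldl (fun acc p => pvStepB acc (p.2 - p.1 + 1)) best

def minimumCardPickup_alt (cards : List Int) : Int :=
  let groups := (PySem.List.enumerate cards).foldl
    (fun (d : PySem.Dict Int (List Int)) p => d.modify p.2 [] (fun l => l ++ [p.1]))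
    (PySem.Dict.mk [])
  match groups.values.foldl pvGaps none with
  | none => -1
  | some b => b

-- ===== PRECONDITION & SPEC =====
def Spec_minimumCardPickup (cards : List Int) (out : Int) : Prop := out = minimumCardPickup_alt cards
instance (cards : List Int) (out : Int) : Decidable (Spec_minimumCardPickup cards out) := by unfold Spec_minimumCardPickup; infer_instance

-- ===== CLAIM (what is proved, stated in full; the proofs are below) =====
def Claim_equal_minimumCardPickup : Prop := ∀ (cards : List Int), Dom_minimumCardPickup cards → Spec_minimumCardPickup cards (minimumCardPickup cards)

-- ===== LEMMAS AND PROOFS =====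

-- minimum on Option Int, none = +inf
def pvOm (a b : Option Int) : Option Int :=
  match a, b with
  | none, b => b
  | some x, none => some x
  | some x, some y => some (min x y)

def pvLastD (l : List Int) : Int := l.getLast?.getD 0

def pvG (L : List (Int × List Int)) : Option Int :=
  L.foldl (fun acc p => pvGaps acc p.2) none

theorem pvOm_none_right (a : Option Int) : pvOm a none = a := by
  cases a <;> rfl

theorem pvOm_assoc (a b c : Option Int) : pvOm (pvOm a b) c = pvOm a (pvOm b c) := by
  cases a <;> cases b <;> cases c <;> simp [pvOm, min_assoc]

theorem pvOm_comm (a b : Option Int) : pvOm a b = pvOm b a := by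
  cases a <;> cases b <;> simp [pvOm, min_comm]

theorem pvStepB_eq_om (b : Option Int) (d : Int) : pvStepB b d = pvOm b (some d) := by
  cases b with
  | none => rfl
  | some x =>
    simp only [pvStepB, pvOm]
    split <;> simp only [Option.some.injEq] <;> omega

theorem foldl_om_init (f : Int × Int → Int) (L : List (Int × Int)) (a : Option Int) :
    L.foldl (fun acc p => pvOm acc (some (f p))) a
      = pvOm a (L.foldl (fun acc p => pvOm acc (some (f p))) none) := by
  induction L generalizing a with
  | nil => simp [List.foldl, pvOm_none_right]
  | cons x xs ih =>
    simp only [List.foldl]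
    rw [ih, ih (pvOm none (some (f x)))]
    rw [← pvOm_assoc]
    rfl

theorem pvGaps_eq_om (best : Option Int) (idxs : List Int) :
    pvGaps best idxs = pvOm best (pvGaps none idxs) := by
  unfold pvGaps
  simp only [pvStepB_eq_om]
  exact foldl_om_init (fun p => p.2 - p.1 + 1) _ best

theorem foldl_pvGaps_init (L : List (Int × List Int)) (a : Option Int) :
    L.foldl (fun acc p => pvGaps acc p.2) a = pvOm a (pvG L) := by
  induction L generalizing a with
  | nil => simp [pvG, List.foldl, pvOm_none_right]
  | cons q Q ih =>
    simp only [List.foldl]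
    rw [ih, pvGaps_eq_om a, pvOm_assoc]
    congr 1
    show pvOm (pvGaps none q.2) (pvG Q)
      = List.foldl (fun acc p => pvGaps acc p.2) (pvGaps none q.2) Q
    rw [ih]

theorem pvG_cons (p : Int × List Int) (L : List (Int × List Int)) :
    pvG (p :: L) = pvOm (pvGaps none p.2) (pvG L) := by
  unfold pvG
  simp only [List.foldl]
  rw [foldl_pvGaps_init]
  rfl

-- zip of an appended singleton
theorem zip_tail_append (l : List Int) (i : Int) (h : l ≠ []) :
    (l ++ [i]).zip (l ++ [i]).tail = l.zip l.tail ++ [(pvLastD l, i)] := by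
  induction l with
  | nil => exact absurd rfl h
  | cons x xs ih =>
    cases xs with
    | nil => simp [pvLastD]
    | cons y ys =>
      have := ih (by simp)
      simp only [List.cons_append, List.tail_cons, List.zip_cons_cons] at *
      rw [this]
      simp [pvLastD]

theorem pvGaps_append (l : List Int) (i : Int) (h : l ≠ []) :
    pvGaps none (l ++ [i]) = pvOm (pvGaps none l) (some (i - pvLastD l + 1)) := by
  unfold pvGaps
  rw [zip_tail_append l i h, List.foldl_append]
  simp only [List.foldl, pvStepB_eq_om]

-- get? through a value-map of items
theorem get?_mk_map_val (L : List (Int × List Int)) (c : Int) :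
    (PySem.Dict.mk (L.map fun p => (p.1, pvLastD p.2))).get? c
      = ((PySem.Dict.mk L).get? c).map pvLastD := by
  induction L with
  | nil => rfl
  | cons x xs ih =>
    obtain ⟨k, v⟩ := x
    simp only [List.map_cons, PySem.Dict.get?_mk_cons]
    by_cases h : (k == c) = true <;> simp [h, ih]

theorem pvMinInf_eq_om (x : Int) (a : Option Int) : pvMinInf x a = pvOm a (some x) := by
  cases a with
  | none => rfl
  | some b => simp [pvMinInf, pvOm, min_comm]

theorem pvLastD_append (l : List Int) (i : Int) : pvLastD (l ++ [i]) = i := by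
  simp [pvLastD]

-- pvG after replacing the (unique) entry of key c by (c, l ++ [i])
theorem pvG_replace (L : List (Int × List Int)) (c i : Int) (l : List Int)
    (hfind : (PySem.Dict.mk L).get? c = some l) (hnodup : (L.map (·.1)).Nodup)
    (hl : l ≠ []) :
    pvG (L.map fun p => if p.1 == c then (c, l ++ [i]) else p)
      = pvOm (pvG L) (some (i - pvLastD l + 1)) := by
  induction L with
  | nil => simp [PySem.Dict.get?] at hfind
  | cons x xs ih =>
    obtain ⟨k, v⟩ := x
    rw [PySem.Dict.get?_mk_cons] at hfind
    simp only [List.map_cons, List.nodup_cons] at hnodup ⊢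
    by_cases hk : (k == c) = true
    · have hkc : k = c := by simpa using hk
      have hv : v = l := by simpa [hk] using hfind
      have hxs : (xs.map fun p => if p.1 == c then (c, l ++ [i]) else p) = xs := by
        have : (xs.map fun p => if p.1 == c then (c, l ++ [i]) else p)
            = xs.map id := by
          apply List.map_congr_left
          intro p hp
          have hpc : p.1 ≠ c := by
            intro hpc
            have hm : p.1 ∈ xs.map (fun x => x.1) := List.mem_map_of_mem hp
            rw [hpc, ← hkc] at hm
            exact hnodup.1 hm
          simp [hpc]
        simpa using this
      simp only [hk, if_true, hxs]
      rw [pvG_cons, pvG_cons]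
      simp only [hv]
      rw [pvGaps_append l i hl, pvOm_comm (pvGaps none l) (some (i - pvLastD l + 1)),
        pvOm_assoc]
      exact pvOm_comm _ _
    · have hkc : k ≠ c := by simpa using hk
      simp only [hk]
      rw [pvG_cons, pvG_cons]
      rw [ih (by simpa [hk] using hfind) hnodup.2, ← pvOm_assoc]
      simp

-- pvG of an appended fresh singleton group is unchanged
theorem pvG_append_singleton (L : List (Int × List Int)) (c i : Int) :
    pvG (L ++ [(c, [i])]) = pvG L := by
  unfold pvG
  rw [List.foldl_append]
  rfl

-- The joint loop invariant: A's state mirrors B's grouped dict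
theorem pvMain (ps : List (Int × Int)) (dA : PySem.Dict Int Int)
    (dB : PySem.Dict Int (List Int)) (ans : Option Int)
    (hmap : dA.items = dB.items.map (fun p => (p.1, pvLastD p.2)))
    (hnodup : dB.keys.Nodup)
    (hne : ∀ p ∈ dB.items, p.2 ≠ [])
    (hans : ans = pvG dB.items) :
    (ps.foldl pvStepA (dA, ans)).2
      = pvG ((ps.foldl (fun (d : PySem.Dict Int (List Int)) p =>
          d.modify p.2 [] (fun l => l ++ [p.1])) dB).items) := by
  induction ps generalizing dA dB ans with
  | nil => simpa using hans
  | cons p ps ih =>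
    obtain ⟨i, c⟩ := p
    have hAitems : dA = PySem.Dict.mk (dB.items.map (fun p => (p.1, pvLastD p.2))) := by
      apply PySem.Dict.ext; exact hmap
    have hgetA : dA.get? c = (dB.get? c).map pvLastD := by
      rw [hAitems, get?_mk_map_val]
    simp only [List.foldl]
    cases h : dB.get? c with
    | none =>
      have hcB : dB.contains c = false := by
        rw [PySem.Dict.contains_eq_isSome_get?, h]; rfl
      have hcA : dA.contains c = false := by
        rw [PySem.Dict.contains_eq_isSome_get?, hgetA, h]; rfl
      have hstep : pvStepA (dA, ans) (i, c) = (dA.insert c i, ans) := by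
        simp [pvStepA, hgetA, h]
      have hmod : dB.modify c [] (fun l => l ++ [i]) = dB.insert c [i] := by
        simp [PySem.Dict.modify, PySem.Dict.getD_eq_get?_getD, h]
      rw [hstep, hmod]
      apply ih
      · rw [PySem.Dict.items_insert_of_not_contains _ _ hcA,
          PySem.Dict.items_insert_of_not_contains _ _ hcB, hmap]
        simp [pvLastD]
      · exact PySem.Dict.nodup_keys_insert _ _ _ hnodup
      · intro q hq
        rw [PySem.Dict.items_insert_of_not_contains _ _ hcB] at hq
        rcases List.mem_append.mp hq with hq | hq
        · exact hne q hq
        · simp at hq; simp [hq]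
      · rw [PySem.Dict.items_insert_of_not_contains _ _ hcB, pvG_append_singleton]
        exact hans
    | some l =>
      have hlmem : (c, l) ∈ dB.items := PySem.Dict.mem_items_of_get?_eq_some _ h
      have hlne : l ≠ [] := hne _ hlmem
      have hcB : dB.contains c = true := by
        rw [PySem.Dict.contains_eq_isSome_get?, h]; rfl
      have hcA : dA.contains c = true := by
        rw [PySem.Dict.contains_eq_isSome_get?, hgetA, h]; rfl
      have hstep : pvStepA (dA, ans) (i, c)
          = (dA.insert c i, pvMinInf (i - pvLastD l + 1) ans) := by
        simp [pvStepA, hgetA, h]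
      have hmod : dB.modify c [] (fun t => t ++ [i]) = dB.insert c (l ++ [i]) := by
        simp [PySem.Dict.modify, PySem.Dict.getD_eq_get?_getD, h]
      rw [hstep, hmod]
      apply ih
      · rw [PySem.Dict.items_insert_of_contains _ _ hcA,
          PySem.Dict.items_insert_of_contains _ _ hcB, hmap]
        rw [List.map_map, List.map_map]
        apply List.map_congr_left
        intro q _
        by_cases hq : (q.1 == c) = true
        · simp [Function.comp, hq, pvLastD_append]
        · simp [Function.comp, hq]
      · rw [show (dB.insert c (l ++ [i])).keys = dB.keys from
          PySem.Dict.keys_insert_of_contains _ _ hcB]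
        exact hnodup
      · intro q hq
        rw [PySem.Dict.items_insert_of_contains _ _ hcB] at hq
        obtain ⟨r, hr, hrq⟩ := List.mem_map.mp hq
        by_cases hrc : (r.1 == c) = true
        · simp only [hrc, if_true] at hrq
          rw [← hrq]; simp
        · simp only [hrc] at hrq
          rw [← hrq]; exact hne r hr
      · rw [PySem.Dict.items_insert_of_contains _ _ hcB]
        rw [pvG_replace dB.items c i l (by exact h) hnodup hlne]
        rw [hans, pvMinInf_eq_om]

-- ===== VERDICT (by name: the statement is the Claim_ definition above) =====
theorem minimumCardPickup_spec : Claim_equal_minimumCardPickup := by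
  intro cards _
  unfold Spec_minimumCardPickup
  have hmain := pvMain (PySem.List.enumerate cards) (PySem.Dict.mk []) (PySem.Dict.mk [])
    none rfl (by simp [PySem.Dict.keys]) (by simp) rfl
  have hvals : ∀ (d : PySem.Dict Int (List Int)),
      d.values.foldl pvGaps none = pvG d.items := by
    intro d
    show (d.items.map (·.2)).foldl pvGaps none = pvG d.items
    rw [List.foldl_map]
    rfl
  show (match (List.foldl pvStepA (PySem.Dict.mk [], none)
        (PySem.List.enumerate cards)).2 with
      | none => (-1 : Int)
      | some a => a)
    = (match List.foldl pvGaps none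
        ((List.foldl (fun (d : PySem.Dict Int (List Int)) p =>
          d.modify p.2 [] (fun l => l ++ [p.1])) (PySem.Dict.mk [])
          (PySem.List.enumerate cards)).values) with
      | none => (-1 : Int)
      | some b => b)
  rw [hvals, ← hmain]
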